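-- pv_equiv track=rewrite | github.com/Shirley-Sun-222/ZJU-Medical-AI | 作业3/Class6_HW/code/TLC_pred.py | build_layer_config
-- ===== SOURCE A (Python) =====
-- def build_layer_config(
--     input_dim,
--     hidden_dims,
--     output_activation,
-- ):
--     """Create dense-layer configuration from hidden sizes and output activation."""
--     layers = []
--     prev_dim = input_dim
--     for h in hidden_dims:
--         layers.append((prev_dim, h, "relu"))
--         prev_dim = h
--     layers.append((prev_dim, 1, output_activation))
--     return layers
-- ===== SOURCE B (Python) =====
-- def build_layer_config(
--     input_dim,
--     hidden_dims,
--     output_activation,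
-- ):
--     """Create dense-layer configuration from hidden sizes and output activation."""
--     hidden_dims = list(hidden_dims)
--     dims = [input_dim, *hidden_dims, 1]
--     acts = ["relu"] * len(hidden_dims) + [output_activation]
--     return [(a, b, act) for (a, b), act in zip(zip(dims, dims[1:]), acts)]
-- ===== Notes on version B (the rewrite author's own statement) =====
-- stated objective: alternative
-- what changed: B builds the full dimension chain [input_dim, *hidden_dims, 1] and an activation table up front, then zips consecutive dimension pairs with activations, instead of threading a prev_dim accumulator through a loop that appends.
import Mathlib
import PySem

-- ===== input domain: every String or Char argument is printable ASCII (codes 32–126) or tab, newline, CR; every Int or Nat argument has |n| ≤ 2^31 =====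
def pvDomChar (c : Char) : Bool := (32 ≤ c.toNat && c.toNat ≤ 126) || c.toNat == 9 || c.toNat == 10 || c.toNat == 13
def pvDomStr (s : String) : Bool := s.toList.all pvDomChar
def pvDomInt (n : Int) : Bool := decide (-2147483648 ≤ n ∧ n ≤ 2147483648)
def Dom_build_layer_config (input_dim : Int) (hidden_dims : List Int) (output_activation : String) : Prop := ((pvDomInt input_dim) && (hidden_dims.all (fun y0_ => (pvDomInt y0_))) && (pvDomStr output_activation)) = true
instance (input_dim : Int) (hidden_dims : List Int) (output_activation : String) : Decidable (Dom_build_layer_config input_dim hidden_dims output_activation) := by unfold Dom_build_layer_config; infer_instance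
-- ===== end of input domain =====

-- B replaces the prev_dim-accumulator loop by precomputing the dimension chain and activation table and zipping adjacent pairs (alternative decomposition, same cost).
-- ===== PORT A =====
def build_layer_config (input_dim : Int) (hidden_dims : List Int) (output_activation : String) : List (Int × Int × String) :=
  -- layers = []; prev_dim = input_dim; for h in hidden_dims: append (prev_dim, h, "relu"); prev_dim = h
  let r := hidden_dims.foldl
    (fun (s : List (Int × Int × String) × Int) h => (s.1 ++ [(s.2, h, "relu")], h))
    ([], input_dim)
  r.1 ++ [(r.2, 1, output_activation)]

-- ===== PORT B =====
def build_layer_config_alt (input_dim : Int) (hidden_dims : List Int) (output_activation : String) : List (Int × Int × String) :=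
  -- dims = [input_dim, *hidden_dims, 1]; acts = ["relu"]*len(hidden_dims) + [output_activation]
  let dims := input_dim :: hidden_dims ++ [1]
  let acts := List.replicate hidden_dims.length "relu" ++ [output_activation]
  (List.zip (List.zip dims dims.tail) acts).map (fun p => (p.1.1, p.1.2, p.2))

-- ===== PRECONDITION & SPEC =====
def Spec_build_layer_config (input_dim : Int) (hidden_dims : List Int) (output_activation : String) (out : List (Int × Int × String)) : Prop := out = build_layer_config_alt input_dim hidden_dims output_activation
instance (input_dim : Int) (hidden_dims : List Int) (output_activation : String) (out : List (Int × Int × String)) : Decidable (Spec_build_layer_config input_dim hidden_dims output_activation out) := by unfold Spec_build_layer_config; infer_instance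

-- ===== CLAIM (what is proved, stated in full; the proofs are below) =====
def Claim_equal_build_layer_config : Prop := ∀ (input_dim : Int) (hidden_dims : List Int) (output_activation : String), Dom_build_layer_config input_dim hidden_dims output_activation → Spec_build_layer_config input_dim hidden_dims output_activation (build_layer_config input_dim hidden_dims output_activation)

-- ===== LEMMAS AND PROOFS =====

-- ===== VERDICT (by name: the statement is the Claim_ definition above) =====
lemma blc_key (oa : String) : ∀ (hd : List Int) (acc : List (Int × Int × String)) (i : Int),
    (let r := hd.foldl (fun (s : List (Int × Int × String) × Int) h => (s.1 ++ [(s.2, h, "relu")], h)) (acc, i);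
     r.1 ++ [(r.2, 1, oa)]) =
    acc ++ (List.zip (List.zip (i :: hd ++ [1]) ((i :: hd ++ [1]).tail))
              (List.replicate hd.length "relu" ++ [oa])).map (fun p => (p.1.1, p.1.2, p.2)) := by
  intro hd
  induction hd with
  | nil => intro acc i; simp
  | cons h t ih =>
      intro acc i
      simp only [List.foldl_cons, List.length_cons, List.replicate_succ, List.cons_append,
        List.tail_cons, List.zip_cons_cons, List.map_cons]
      have := ih (acc ++ [(i, h, "relu")]) h
      simp only at this
      simp [this]

theorem build_layer_config_spec : Claim_equal_build_layer_config := by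
  intro i hd oa _
  unfold Spec_build_layer_config build_layer_config build_layer_config_alt
  simpa using blc_key oa hd [] i
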